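-- pv_equiv track=rewrite | github.com/FacundoOZ/University-of-Buenos-Aires | MSc-in-Computer-Science/Algoritmos 1/guías/8_Integradora_Python.py | pos_umbral
-- ===== SOURCE A (Python) =====
-- def pos_umbral(s: list[int], u: int) -> int:
--   res: int    = 0
--   suma: int   = 0
--   for j in range(len(s)):                    # Por cada elemento de s,
--     if s[j] > 0:                             # si es > 0,
--       suma += s[j]                           # lo sumo.
--       if suma > u:                           # Si la suma superó el umbral, listo!
--         res = j                              # res = índice donde se superó el umbral.
--         break
--   if suma <= u:                              # Si no, res=-1
--     res = -1
--   return res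
-- ===== SOURCE B (Python) =====
-- def pos_umbral(s: list[int], u: int) -> int:
--     # Pass 1: table acc, where acc[j] is the cumulative sum of positives up to j
--     # at positive positions and None at non-positive positions.
--     acc = []
--     c = 0
--     for x in s:
--         if x > 0:
--             c += x
--             acc.append(c)
--         else:
--             acc.append(None)
--     # Pass 2: first index whose (positive-position) cumulative sum exceeds u.
--     for j in range(len(acc)):
--         if acc[j] is not None and acc[j] > u:
--             return j
--     return -1
-- ===== Notes on version B (the rewrite author's own statement) =====
-- stated objective: alternative
-- what changed: B replaces A's fused loop with mutable res/suma state and break by two explicit passes: first build a prefix table of cumulative positive sums, then search it for the first index exceeding u, returning -1 when no index crosses.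
-- intended difference: When u < 0 and the list has no positive element (including the empty list), A returns the leftover initial res = 0 even though no index ever crossed the threshold, while B returns the intended -1 (no crossing index exists). — e.g. on pos_umbral([-1], -1): A returns 0, B returns -1
import Mathlib
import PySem

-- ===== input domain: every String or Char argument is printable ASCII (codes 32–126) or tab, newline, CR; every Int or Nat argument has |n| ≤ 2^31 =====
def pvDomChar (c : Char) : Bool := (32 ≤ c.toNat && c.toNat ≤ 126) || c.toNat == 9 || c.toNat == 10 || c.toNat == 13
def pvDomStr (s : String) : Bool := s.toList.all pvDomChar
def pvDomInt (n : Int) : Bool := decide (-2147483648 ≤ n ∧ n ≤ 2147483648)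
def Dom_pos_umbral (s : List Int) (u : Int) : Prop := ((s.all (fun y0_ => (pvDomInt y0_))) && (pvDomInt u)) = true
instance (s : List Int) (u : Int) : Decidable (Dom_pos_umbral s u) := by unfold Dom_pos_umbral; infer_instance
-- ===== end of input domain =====

-- B re-decomposes A's fused break-loop into two passes (prefix table, then search);
-- on u < 0 with no positive element A returns its stale initial res = 0, B the intended -1.

-- ===== PORT A =====
-- A's for-loop over j with mutable suma/res and break, as structural recursion
-- carrying (index j, suma, res); returns the pair (res, suma) at loop exit/break.
def posUmbralGo (u : Int) : List Int → Nat → Int → Int → Int × Int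
  | [], _, suma, res => (res, suma)
  | x :: rest, j, suma, res =>
    if x > 0 then
      let suma' := suma + x
      if suma' > u then (Int.ofNat j, suma')      -- res = j; break
      else posUmbralGo u rest (j + 1) suma' res
    else posUmbralGo u rest (j + 1) suma res

def pos_umbral (s : List Int) (u : Int) : Int :=
  let p := posUmbralGo u s 0 0 0
  if p.2 ≤ u then -1 else p.1

-- ===== PORT B =====
-- Pass 1: the prefix table (cumulative sum of positives at positive positions, none elsewhere).
def posUmbralAcc : List Int → Int → List (Option Int)
  | [], _ => []
  | x :: rest, c =>
    if x > 0 then some (c + x) :: posUmbralAcc rest (c + x)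
    else none :: posUmbralAcc rest c

-- Pass 2: first index whose table entry exceeds u, else -1.
def posUmbralFind (u : Int) : List (Option Int) → Nat → Int
  | [], _ => -1
  | a :: rest, j =>
    match a with
    | some v => if v > u then Int.ofNat j else posUmbralFind u rest (j + 1)
    | none => posUmbralFind u rest (j + 1)

def pos_umbral_alt (s : List Int) (u : Int) : Int :=
  posUmbralFind u (posUmbralAcc s 0) 0

-- ===== PRECONDITION & SPEC =====
-- When u < 0 and s has no positive element (incl. []), A returns its stale initial
-- res = 0 though no index crossed the threshold; B returns the intended -1.
def D_pos_umbral (s : List Int) (u : Int) : Prop := u < 0 ∧ ∀ x ∈ s, x ≤ 0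
instance (s : List Int) (u : Int) : Decidable (D_pos_umbral s u) := by unfold D_pos_umbral; infer_instance

def Spec_pos_umbral (s : List Int) (u : Int) (out : Int) : Prop := ¬ D_pos_umbral s u → out = pos_umbral_alt s u
instance (s : List Int) (u : Int) (out : Int) : Decidable (Spec_pos_umbral s u out) := by unfold Spec_pos_umbral; infer_instance

def pvDiffWitness_pos_umbral : List Int × Int := ([-1], -1)
def pvDiffWitnessOut_pos_umbral : Int × Int := (0, -1)

-- ===== CLAIM (what is proved, stated in full; the proofs are below) =====
def Claim_unchanged_pos_umbral : Prop := ∀ (s : List Int) (u : Int), Dom_pos_umbral s u → Spec_pos_umbral s u (pos_umbral s u)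
def Claim_changed_pos_umbral : Prop := Dom_pos_umbral (pvDiffWitness_pos_umbral.1) (pvDiffWitness_pos_umbral.2) ∧ D_pos_umbral (pvDiffWitness_pos_umbral.1) (pvDiffWitness_pos_umbral.2) ∧ pos_umbral (pvDiffWitness_pos_umbral.1) (pvDiffWitness_pos_umbral.2) = pvDiffWitnessOut_pos_umbral.1 ∧ pos_umbral_alt (pvDiffWitness_pos_umbral.1) (pvDiffWitness_pos_umbral.2) = pvDiffWitnessOut_pos_umbral.2 ∧ pvDiffWitnessOut_pos_umbral.1 ≠ pvDiffWitnessOut_pos_umbral.2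
def Claim_exact_pos_umbral : Prop := ∀ (s : List Int) (u : Int), Dom_pos_umbral s u → D_pos_umbral s u → pos_umbral s u ≠ pos_umbral_alt s u

-- ===== LEMMAS AND PROOFS =====

-- Loop still below threshold: A's remaining loop equals B's search of the table built from suma.
theorem go_eq_of_le (u : Int) (s : List Int) : ∀ (j : Nat) (suma res : Int), suma ≤ u →
    (let p := posUmbralGo u s j suma res; if p.2 ≤ u then (-1 : Int) else p.1)
      = posUmbralFind u (posUmbralAcc s suma) j := by
  induction s with
  | nil => intro j suma res h; simp [posUmbralGo, posUmbralAcc, posUmbralFind, h]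
  | cons x rest ih =>
    intro j suma res h
    by_cases hx : x > 0
    · by_cases hc : suma + x > u
      · simp [posUmbralGo, posUmbralAcc, posUmbralFind, hx, hc, not_le.mpr hc]
      · simp only [posUmbralGo, posUmbralAcc, posUmbralFind, hx, hc, if_true, if_false,
          if_neg (by omega : ¬ suma + x > u)]
        simpa [posUmbralFind, hc] using ih (j + 1) (suma + x) res (by omega)
    · simp only [posUmbralGo, posUmbralAcc, if_neg hx]
      exact ih (j + 1) suma res h

-- Above threshold already, but a positive element remains: both sides break at the first positive.
theorem go_eq_of_pos (u : Int) (s : List Int) : ∀ (j : Nat) (suma res : Int), 0 ≤ suma → u < suma →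
    (∃ x ∈ s, 0 < x) →
    (let p := posUmbralGo u s j suma res; if p.2 ≤ u then (-1 : Int) else p.1)
      = posUmbralFind u (posUmbralAcc s suma) j := by
  induction s with
  | nil => intro j suma res _ _ hex; simp at hex
  | cons x rest ih =>
    intro j suma res h0 hu hex
    by_cases hx : x > 0
    · have hc : suma + x > u := by omega
      simp [posUmbralGo, posUmbralAcc, posUmbralFind, hx, hc, not_le.mpr hc]
    · have hex' : ∃ y ∈ rest, 0 < y := by
        rcases hex with ⟨y, hy, hyp⟩
        rcases List.mem_cons.mp hy with rfl | hy'
        · omega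
        · exact ⟨y, hy', hyp⟩
      simp only [posUmbralGo, posUmbralAcc, if_neg hx]
      exact ih (j + 1) suma res h0 hu hex'

-- Inside D_: A's loop never fires, returning its initial state.
theorem go_all_nonpos (u : Int) (s : List Int) : ∀ (j : Nat) (suma res : Int), (∀ x ∈ s, x ≤ 0) →
    posUmbralGo u s j suma res = (res, suma) := by
  induction s with
  | nil => intro j suma res _; simp [posUmbralGo]
  | cons x rest ih =>
    intro j suma res h
    have hx : ¬ x > 0 := by have := h x (by simp); omega
    simp only [posUmbralGo, if_neg hx]
    exact ih (j + 1) suma res (fun y hy => h y (List.mem_cons_of_mem _ hy))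

-- Inside D_: B's table is all none, so the search returns -1.
theorem find_all_nonpos (u : Int) (s : List Int) : ∀ (c : Int) (j : Nat), (∀ x ∈ s, x ≤ 0) →
    posUmbralFind u (posUmbralAcc s c) j = -1 := by
  induction s with
  | nil => intro c j _; simp [posUmbralAcc, posUmbralFind]
  | cons x rest ih =>
    intro c j h
    have hx : ¬ x > 0 := by have := h x (by simp); omega
    simp only [posUmbralAcc, if_neg hx, posUmbralFind]
    exact ih c (j + 1) (fun y hy => h y (List.mem_cons_of_mem _ hy))

-- ===== VERDICT (by name: the statement is the Claim_ definition above) =====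
theorem pos_umbral_spec : Claim_unchanged_pos_umbral := by
  intro s u _ hnd
  unfold pos_umbral pos_umbral_alt
  by_cases hu : 0 ≤ u
  · exact go_eq_of_le u s 0 0 0 hu
  · have hex : ∃ x ∈ s, 0 < x := by
      unfold D_pos_umbral at hnd
      push_neg at hnd
      rcases hnd (by omega) with ⟨x, hx, hxp⟩
      exact ⟨x, hx, by omega⟩
    exact go_eq_of_pos u s 0 0 0 le_rfl (by omega) hex

theorem pos_umbral_changed : Claim_changed_pos_umbral := by unfold Claim_changed_pos_umbral; decide

theorem pos_umbral_tight : Claim_exact_pos_umbral := by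
  intro s u _ hd
  rcases hd with ⟨hu, hall⟩
  unfold pos_umbral pos_umbral_alt
  rw [go_all_nonpos u s 0 0 0 hall, find_all_nonpos u s 0 0 hall]
  have h0 : ¬ ((0 : Int) ≤ u) := by omega
  simp only [h0, if_false]
  decide
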